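-- pv_equiv track=rewrite | github.com/willcaty/PAT-by-Python3 | PAT (Basic Level) Practice （中文）/1003 我要通过！ (20分).py | check
-- ===== SOURCE A (Python) =====
-- def check(input_str: str):
--     if input_str.count("P") != 1 or input_str.count("T") != 1:
--         return False
--     elif input_str.index("T") < input_str.index("P"):
--         return False
--     elif input_str.count("A") < 1:
--         return False
--     for i in input_str:
--         if i not in ["P", "A", "T"]:
--             return False
--     p_index = input_str.index('P')
--     t_index = input_str.index('T')
--     if input_str[p_index:t_index].count('A') > 0:
--         left_a = input_str[0:p_index].count('A')
--         middle_a = input_str[p_index:t_index].count('A')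
--         right_a = input_str[t_index:].count('A')
--         if left_a * middle_a == right_a:
--             return True
--         else:
--             return False
--     else:
--         return False
-- ===== SOURCE B (Python) =====
-- def check(input_str: str):
--     # Single left-to-right pass: a 3-state machine (before P / between P and T / after T)
--     # counting the A's of each region; accept iff the scan ends after T with
--     # at least one middle A and left_a * middle_a == right_a.
--     state = 0
--     a = b = c = 0
--     for ch in input_str:
--         if ch == 'A':
--             if state == 0:
--                 a += 1
--             elif state == 1:
--                 b += 1
--             else:
--                 c += 1
--         elif ch == 'P' and state == 0:
--             state = 1
--         elif ch == 'T' and state == 1: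
--             state = 2
--         else:
--             return False
--     return state == 2 and b >= 1 and a * b == c
-- ===== Notes on version B (the rewrite author's own statement) =====
-- stated objective: alternative
-- what changed: Replaces A's multi-pass pipeline of count/index/slice calls with a single left-to-right scan by a 3-state machine that counts the A's of each region and checks the product equation at the end.
import Mathlib
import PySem

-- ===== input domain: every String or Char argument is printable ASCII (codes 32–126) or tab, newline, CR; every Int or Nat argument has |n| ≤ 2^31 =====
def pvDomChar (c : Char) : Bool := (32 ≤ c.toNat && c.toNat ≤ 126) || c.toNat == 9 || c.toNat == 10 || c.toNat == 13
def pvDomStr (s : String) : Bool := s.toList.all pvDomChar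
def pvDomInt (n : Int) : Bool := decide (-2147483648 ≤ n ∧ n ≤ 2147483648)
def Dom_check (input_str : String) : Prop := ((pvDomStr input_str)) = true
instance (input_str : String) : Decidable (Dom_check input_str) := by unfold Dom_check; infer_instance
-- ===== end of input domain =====

-- B replaces A's multi-pass count/index/slice pipeline with a single 3-state scan; same O(n) cost, no speed claim.

-- ===== PORT A =====
-- A's str.index("P")/("T") calls are only reached when count = 1 guarantees the
-- substring is present, so PySem.Chars.find (first occurrence, -1 if absent) is exact there.
def check (input_str : String) : Bool :=
  let s := input_str.toList
  if ¬ (PySem.Chars.count s ['P'] = 1 ∧ PySem.Chars.count s ['T'] = 1) then false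
  else if PySem.Chars.find s ['T'] < PySem.Chars.find s ['P'] then false
  else if PySem.Chars.count s ['A'] < 1 then false
  else if ¬ s.all (fun i => i ∈ ['P', 'A', 'T']) then false
  else
    let p_index := PySem.Chars.find s ['P']
    let t_index := PySem.Chars.find s ['T']
    if 0 < PySem.Chars.count (PySem.Chars.slice s (some p_index) (some t_index)) ['A'] then
      let left_a := PySem.Chars.count (PySem.Chars.slice s (some 0) (some p_index)) ['A']
      let middle_a := PySem.Chars.count (PySem.Chars.slice s (some p_index) (some t_index)) ['A']
      let right_a := PySem.Chars.count (PySem.Chars.slice s (some t_index) none) ['A']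
      decide (left_a * middle_a = right_a)
    else false

-- ===== PORT B =====
-- state 0 = before 'P', 1 = between 'P' and 'T', 2 = after 'T'; a/b/c count the A's of each region.
def checkAltGo : List Char → Nat → Nat → Nat → Nat → Bool
  | [], state, a, b, c => decide (state = 2 ∧ 1 ≤ b ∧ a * b = c)
  | ch :: t, state, a, b, c =>
    if ch = 'A' then
      if state = 0 then checkAltGo t state (a + 1) b c
      else if state = 1 then checkAltGo t state a (b + 1) c
      else checkAltGo t state a b (c + 1)
    else if ch = 'P' ∧ state = 0 then checkAltGo t 1 a b c
    else if ch = 'T' ∧ state = 1 then checkAltGo t 2 a b c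
    else false

def check_alt (input_str : String) : Bool :=
  checkAltGo input_str.toList 0 0 0 0

-- ===== PRECONDITION & SPEC =====
def Spec_check (input_str : String) (out : Bool) : Prop := out = check_alt input_str
instance (input_str : String) (out : Bool) : Decidable (Spec_check input_str out) := by unfold Spec_check; infer_instance

-- ===== CLAIM (what is proved, stated in full; the proofs are below) =====
def Claim_equal_check : Prop := ∀ (input_str : String), Dom_check input_str → Spec_check input_str (check input_str)

-- ===== LEMMAS AND PROOFS =====

-- the canonical accepted shape both programs recognise
def GoodCheck (l : List Char) : Prop :=
  ∃ x y z, l = List.replicate x 'A' ++ 'P' :: (List.replicate y 'A' ++ 'T' :: List.replicate z 'A') ∧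
    1 ≤ y ∧ x * y = z

theorem count_go_singleton (c : Char) : ∀ (fuel : Nat) (l : List Char) (acc : Nat),
    l.length ≤ fuel → PySem.Chars.count.go [c] fuel l acc = acc + l.count c := by
  intro fuel
  induction fuel with
  | zero => intro l acc h; simp at h; subst h; simp [PySem.Chars.count.go]
  | succ n ih =>
    intro l acc h
    cases l with
    | nil => simp [PySem.Chars.count.go]
    | cons x t =>
      simp only [List.length_cons, Nat.succ_le_succ_iff] at h
      by_cases hx : x = c
      · subst hx
        simp [PySem.Chars.count.go, List.isPrefixOf, ih t _ h, List.count_cons]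
        omega
      · simp [PySem.Chars.count.go, List.isPrefixOf, hx, ih t _ h, Ne.symm hx]

theorem count_singleton (l : List Char) (c : Char) :
    PySem.Chars.count l [c] = l.count c := by
  simp [PySem.Chars.count, count_go_singleton c l.length l 0 le_rfl]

theorem find_go_singleton (c : Char) : ∀ (l : List Char) (k : Nat),
    PySem.Chars.find.go [c] l k = if c ∈ l then ((k + l.idxOf c : Nat) : Int) else -1 := by
  intro l
  induction l with
  | nil => intro k; simp [PySem.Chars.find.go]
  | cons x t ih =>
    intro k
    by_cases hx : x = c
    · subst hx; simp [PySem.Chars.find.go, List.isPrefixOf, List.idxOf_cons_self]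
    · simp [PySem.Chars.find.go, List.isPrefixOf, hx, ih (k + 1), Ne.symm hx]
      by_cases hm : c ∈ t
      · simp [hm]; omega
      · simp [hm]

theorem find_singleton (l : List Char) (c : Char) :
    PySem.Chars.find l [c] = if c ∈ l then (l.idxOf c : Int) else -1 := by
  simp [PySem.Chars.find, find_go_singleton c l 0]

theorem go2_iff : ∀ (l : List Char) (a b c : Nat),
    checkAltGo l 2 a b c = true ↔
      ∃ z, l = List.replicate z 'A' ∧ 1 ≤ b ∧ a * b = c + z := by
  intro l
  induction l with
  | nil =>
    intro a b c
    simp only [checkAltGo, decide_eq_true_eq]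
    constructor
    · rintro ⟨_, hb, h⟩; exact ⟨0, by simp, hb, by omega⟩
    · rintro ⟨z, hz, hb, h⟩
      have hz0 : z = 0 := by
        cases z with
        | zero => rfl
        | succ n => simp [List.replicate_succ] at hz
      exact ⟨trivial, hb, by omega⟩
  | cons x t ih =>
    intro a b c
    by_cases hx : x = 'A'
    · subst hx
      simp only [checkAltGo]
      norm_num
      rw [ih a b (c + 1)]
      constructor
      · rintro ⟨z, hz, hb, h⟩
        exact ⟨z + 1, by simp [List.replicate_succ, hz], hb, by omega⟩
      · rintro ⟨z, hz, hb, h⟩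
        cases z with
        | zero => simp at hz
        | succ n =>
          simp [List.replicate_succ] at hz
          exact ⟨n, hz, hb, by omega⟩
    · simp only [checkAltGo, if_neg hx]
      constructor
      · intro h
        split_ifs at h <;> simp_all [checkAltGo]
      · rintro ⟨z, hz, _, _⟩
        cases z with
        | zero => simp at hz
        | succ n => simp [List.replicate_succ] at hz; exact absurd hz.1 hx

theorem go1_iff : ∀ (l : List Char) (a b c : Nat),
    checkAltGo l 1 a b c = true ↔
      ∃ y z, l = List.replicate y 'A' ++ 'T' :: List.replicate z 'A' ∧
        1 ≤ b + y ∧ a * (b + y) = c + z := by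
  intro l
  induction l with
  | nil =>
    intro a b c
    simp only [checkAltGo, decide_eq_true_eq]
    constructor
    · rintro ⟨h, _⟩; omega
    · rintro ⟨y, z, hz, _, _⟩; simp at hz
  | cons x t ih =>
    intro a b c
    by_cases hx : x = 'A'
    · subst hx
      simp only [checkAltGo, if_pos rfl]
      norm_num
      rw [ih a (b + 1) c]
      constructor
      · rintro ⟨y, z, hz, hb, h⟩
        exact ⟨y + 1, z, by simp [List.replicate_succ, hz], by omega,
          by rw [show b + (y + 1) = b + 1 + y by omega]; exact h⟩
      · rintro ⟨y, z, hz, hb, h⟩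
        cases y with
        | zero => simp at hz
        | succ n =>
          simp [List.replicate_succ] at hz
          exact ⟨n, z, by simp [hz], by omega,
            by rw [show b + 1 + n = b + (n + 1) by omega]; exact h⟩
    · by_cases hT : x = 'T'
      · subst hT
        simp only [checkAltGo]
        norm_num
        rw [go2_iff t a b c]
        constructor
        · rintro ⟨z, hz, hb, h⟩
          exact ⟨0, z, by simp [hz], by omega, by simpa using h⟩
        · rintro ⟨y, z, hz, hb, h⟩
          cases y with
          | succ n => simp [List.replicate_succ] at hz
          | zero =>
            simp at hz
            exact ⟨z, hz, by omega, by simpa using h⟩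
      · simp only [checkAltGo, if_neg hx]
        norm_num [hx, hT]
        rintro y z hz
        cases y with
        | zero => simp at hz; exact absurd hz.1 hT
        | succ n => simp [List.replicate_succ] at hz; exact absurd hz.1 hx

theorem go0_iff : ∀ (l : List Char) (a b c : Nat),
    checkAltGo l 0 a b c = true ↔
      ∃ x y z, l = List.replicate x 'A' ++ 'P' :: (List.replicate y 'A' ++ 'T' :: List.replicate z 'A') ∧
        1 ≤ b + y ∧ (a + x) * (b + y) = c + z := by
  intro l
  induction l with
  | nil =>
    intro a b c
    simp only [checkAltGo, decide_eq_true_eq]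
    constructor
    · rintro ⟨h, _⟩; omega
    · rintro ⟨x, y, z, hz, _, _⟩; simp at hz
  | cons ch t ih =>
    intro a b c
    by_cases hA : ch = 'A'
    · subst hA
      simp only [checkAltGo, if_pos rfl]
      norm_num
      rw [ih (a + 1) b c]
      constructor
      · rintro ⟨x, y, z, hz, hb, h⟩
        exact ⟨x + 1, y, z, by simp [List.replicate_succ, hz], hb,
          by rw [show a + (x + 1) = a + 1 + x by omega]; exact h⟩
      · rintro ⟨x, y, z, hz, hb, h⟩
        cases x with
        | zero => simp at hz
        | succ n =>
          simp [List.replicate_succ] at hz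
          exact ⟨n, y, z, by simp [hz], hb,
            by rw [show a + 1 + n = a + (n + 1) by omega]; exact h⟩
    · by_cases hP : ch = 'P'
      · subst hP
        simp only [checkAltGo]
        norm_num
        rw [go1_iff t a b c]
        constructor
        · rintro ⟨y, z, hz, hb, h⟩
          exact ⟨0, y, z, by simp [hz], hb, by simpa using h⟩
        · rintro ⟨x, y, z, hz, hb, h⟩
          cases x with
          | succ n => simp [List.replicate_succ] at hz
          | zero =>
            simp at hz
            exact ⟨y, z, hz, hb, by simpa using h⟩
      · simp only [checkAltGo, if_neg hA]
        norm_num [hA, hP]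
        rintro x y z hz
        cases x with
        | zero => simp at hz; exact absurd hz.1 hP
        | succ n => simp [List.replicate_succ] at hz; exact absurd hz.1 hA

theorem check_alt_iff (s : String) : check_alt s = true ↔ GoodCheck s.toList := by
  unfold check_alt GoodCheck
  rw [go0_iff]
  simp

theorem check_of_good (s : String) (h : GoodCheck s.toList) : check s = true := by
  obtain ⟨x, y, z, hl, hy, hxyz⟩ := h
  unfold check
  simp only [count_singleton, find_singleton]
  rw [hl]
  set r : List Char := List.replicate x 'A' ++ 'P' :: (List.replicate y 'A' ++ 'T' :: List.replicate z 'A') with hr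
  have hcP : r.count 'P' = 1 := by
    simp [hr, List.count_append, List.count_replicate]
  have hcT : r.count 'T' = 1 := by
    simp [hr, List.count_append, List.count_replicate]
  have hcA : r.count 'A' = x + y + z := by
    simp [hr, List.count_append, List.count_replicate]; omega
  have hmP : 'P' ∈ r := by simp [hr]
  have hmT : 'T' ∈ r := by simp [hr]
  have hidxP : r.idxOf 'P' = x := by
    rw [hr, List.idxOf_append_of_notMem (by simp [List.mem_replicate])]
    simp
  have hidxT : r.idxOf 'T' = x + 1 + y := by
    rw [hr, List.idxOf_append_of_notMem (by simp [List.mem_replicate]),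
      List.idxOf_cons_ne _ (by decide),
      List.idxOf_append_of_notMem (by simp [List.mem_replicate])]
    simp
    omega
  have hdropx : r.drop x = 'P' :: (List.replicate y 'A' ++ 'T' :: List.replicate z 'A') := by
    rw [hr]
    simpa using List.drop_left (l₁ := List.replicate x 'A')
      (l₂ := 'P' :: (List.replicate y 'A' ++ 'T' :: List.replicate z 'A'))
  have hdropt : r.drop (x + 1 + y) = 'T' :: List.replicate z 'A' := by
    rw [show x + 1 + y = x + (1 + y) by omega, ← List.drop_drop, hdropx,
      show 1 + y = y + 1 by omega, List.drop_succ_cons]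
    simpa using List.drop_left (l₁ := List.replicate y 'A')
      (l₂ := 'T' :: List.replicate z 'A')
  have htakex : r.take x = List.replicate x 'A' := by
    rw [hr]
    simpa using List.take_left (l₁ := List.replicate x 'A')
      (l₂ := 'P' :: (List.replicate y 'A' ++ 'T' :: List.replicate z 'A'))
  have hall : r.all (fun i => i ∈ ['P', 'A', 'T']) = true := by
    rw [List.all_eq_true]
    intro c hc
    rw [hr] at hc
    rcases List.mem_append.mp hc with h | h
    · rw [List.eq_of_mem_replicate h]; simp
    · rcases List.mem_cons.mp h with h | h
      · rw [h]; simp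
      · rcases List.mem_append.mp h with h | h
        · rw [List.eq_of_mem_replicate h]; simp
        · rcases List.mem_cons.mp h with h | h
          · rw [h]; simp
          · rw [List.eq_of_mem_replicate h]; simp
  simp only [hmP, hmT, if_pos, hidxP, hidxT, hcP, hcT, hcA, hall,
    PySem.Chars.slice_eq_listSlice, PySem.List.slice_natCast, PySem.List.slice_zero_start,
    PySem.List.slice_to_natCast, PySem.List.slice_from_natCast,
    hdropx, hdropt, htakex]
  have htakey : List.take y (List.replicate y 'A' ++ 'T' :: List.replicate z 'A') = List.replicate y 'A' := by
    simpa using List.take_left (l₁ := List.replicate y 'A') (l₂ := 'T' :: List.replicate z 'A')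
  rw [if_neg (by simp), if_neg (by push_cast; omega), if_neg (by omega), if_neg (by simp),
    show x + 1 + y - x = y + 1 by omega, List.take_succ_cons, htakey]
  simp [List.count_cons, List.count_replicate, hxyz]
  omega

theorem good_of_check (s : String) (h : check s = true) : GoodCheck s.toList := by
  unfold check at h
  simp only [count_singleton, find_singleton] at h
  set l : List Char := s.toList with hls
  by_cases h1 : l.count 'P' = 1 ∧ l.count 'T' = 1
  case neg => rw [if_pos (by exact h1)] at h; exact absurd h (by simp)
  obtain ⟨hcP, hcT⟩ := h1
  rw [if_neg (by push_neg; omega)] at h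
  have hmP : 'P' ∈ l := List.count_pos_iff.mp (by omega)
  have hmT : 'T' ∈ l := List.count_pos_iff.mp (by omega)
  rw [if_pos hmP, if_pos hmT] at h
  set p : Nat := l.idxOf 'P' with hp
  set t : Nat := l.idxOf 'T' with ht
  by_cases h2 : (t : Int) < (p : Int)
  case pos => rw [if_pos h2] at h; exact absurd h (by simp)
  rw [if_neg h2] at h
  have hpt : p ≤ t := by exact_mod_cast not_lt.mp h2
  by_cases h3 : l.count 'A' < 1
  case pos => rw [if_pos h3] at h; exact absurd h (by simp)
  rw [if_neg h3] at h
  by_cases h4 : l.all (fun i => i ∈ ['P', 'A', 'T']) = true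
  case neg => rw [if_pos h4] at h; exact absurd h (by simp)
  rw [if_neg (not_not_intro h4)] at h
  have hpl : p < l.length := List.idxOf_lt_length_of_mem hmP
  have htl : t < l.length := List.idxOf_lt_length_of_mem hmT
  have hgp : l[p] = 'P' := List.getElem_idxOf hpl
  have hgt : l[t] = 'T' := List.getElem_idxOf htl
  have hptlt : p < t := by
    rcases Nat.lt_or_ge p t with hlt | hge
    · exact hlt
    · exfalso
      have hpe : p = t := le_antisymm hpt hge
      have h1 : l[p]? = some 'P' := by rw [List.getElem?_eq_getElem hpl, hgp]
      have h2 : l[t]? = some 'T' := by rw [List.getElem?_eq_getElem htl, hgt]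
      rw [hpe, h2] at h1
      exact absurd (Option.some.inj h1) (by decide)
  have hdp : l.drop p = 'P' :: l.drop (p + 1) := by rw [← List.getElem_cons_drop hpl, hgp]
  have hdt : l.drop t = 'T' :: l.drop (t + 1) := by rw [← List.getElem_cons_drop htl, hgt]
  have hLp : l = l.take p ++ 'P' :: l.drop (p + 1) := by
    conv_lhs => rw [← List.take_append_drop p l, hdp]
  have hLt : l = l.take t ++ 'T' :: l.drop (t + 1) := by
    conv_lhs => rw [← List.take_append_drop t l, hdt]
  have hnP : 'P' ∉ l.take p ∧ 'P' ∉ l.drop (p + 1) := by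
    have hc : List.count 'P' (l.take p ++ 'P' :: l.drop (p + 1)) = 1 := by rw [← hLp]; exact hcP
    simp [List.count_append, List.count_cons] at hc
    have hc1 : List.count 'P' (l.take p) = 0 ∧ List.count 'P' (l.drop (p + 1)) = 0 := by omega
    exact ⟨List.count_eq_zero.mp hc1.1, List.count_eq_zero.mp hc1.2⟩
  have hnT : 'T' ∉ l.take t ∧ 'T' ∉ l.drop (t + 1) := by
    have hc : List.count 'T' (l.take t ++ 'T' :: l.drop (t + 1)) = 1 := by rw [← hLt]; exact hcT
    simp [List.count_append, List.count_cons] at hc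
    have hc1 : List.count 'T' (l.take t) = 0 ∧ List.count 'T' (l.drop (t + 1)) = 0 := by omega
    exact ⟨List.count_eq_zero.mp hc1.1, List.count_eq_zero.mp hc1.2⟩
  have hmid : l.drop (p + 1) = (l.take t).drop (p + 1) ++ 'T' :: l.drop (t + 1) := by
    conv_lhs => rw [hLt]
    rw [List.drop_append_of_le_length (by simp [List.length_take]; omega)]
  have hallmem : ∀ c ∈ l, c = 'P' ∨ c = 'A' ∨ c = 'T' := by
    rw [List.all_eq_true] at h4
    intro c hc
    simpa using h4 c hc
  have hAtake : ∀ c ∈ l.take p, c = 'A' := by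
    intro c hc
    rcases hallmem c (List.mem_of_mem_take hc) with hh | hh | hh
    · exact absurd (hh ▸ hc) hnP.1
    · exact hh
    · have hct : c ∈ l.take t := by
        have he : l.take p = (l.take t).take p := by
          rw [List.take_take, min_eq_left (le_of_lt hptlt)]
        exact List.mem_of_mem_take (he ▸ hc)
      exact absurd (hh ▸ hct) hnT.1
  have hAmid : ∀ c ∈ (l.take t).drop (p + 1), c = 'A' := by
    intro c hc
    have hct : c ∈ l.take t := List.mem_of_mem_drop hc
    rcases hallmem c (List.mem_of_mem_take hct) with hh | hh | hh
    · have hcd : c ∈ l.drop (p + 1) := by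
        rw [List.drop_take] at hc
        exact List.mem_of_mem_take hc
      exact absurd (hh ▸ hcd) hnP.2
    · exact hh
    · exact absurd (hh ▸ hct) hnT.1
  have hAdrop : ∀ c ∈ l.drop (t + 1), c = 'A' := by
    intro c hc
    rcases hallmem c (List.mem_of_mem_drop hc) with hh | hh | hh
    · have hcd : c ∈ l.drop (p + 1) := by
        have he : l.drop (t + 1) = (l.drop (p + 1)).drop (t - p) := by
          rw [List.drop_drop]
          congr 1
          omega
        rw [he] at hc
        exact List.mem_of_mem_drop hc
      exact absurd (hh ▸ hcd) hnP.2
    · exact hh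
    · exact absurd (hh ▸ hc) hnT.2
  have hxrep : l.take p = List.replicate p 'A' := by
    have hh := List.eq_replicate_length.mpr hAtake
    rwa [List.length_take, min_eq_left (le_of_lt hpl)] at hh
  have hyrep : (l.take t).drop (p + 1) = List.replicate (t - (p + 1)) 'A' := by
    have hh := List.eq_replicate_length.mpr hAmid
    rwa [List.length_drop, List.length_take, min_eq_left (le_of_lt htl)] at hh
  have hzrep : l.drop (t + 1) = List.replicate (l.length - (t + 1)) 'A' := by
    have hh := List.eq_replicate_length.mpr hAdrop
    rwa [List.length_drop] at hh
  simp only [PySem.Chars.slice_eq_listSlice, PySem.List.slice_natCast,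
    PySem.List.slice_zero_start, PySem.List.slice_to_natCast,
    PySem.List.slice_from_natCast] at h
  have hmids : (l.drop p).take (t - p) = 'P' :: List.replicate (t - (p + 1)) 'A' := by
    rw [hdp, show t - p = (t - (p + 1)) + 1 by omega, List.take_succ_cons]
    congr 1
    rw [← hyrep, List.drop_take]
  rw [hmids, hxrep, hdt, hzrep] at h
  simp [List.count_cons, List.count_replicate] at h
  refine ⟨p, t - (p + 1), l.length - (t + 1), ?_, ?_, ?_⟩
  · conv_lhs => rw [hLp]
    rw [hmid, hxrep, hyrep, hzrep]
  · omega
  · exact h.2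

theorem check_iff (s : String) : check s = true ↔ GoodCheck s.toList :=
  ⟨good_of_check s, check_of_good s⟩

-- ===== VERDICT (by name: the statement is the Claim_ definition above) =====
theorem check_spec : Claim_equal_check := by
  intro s _
  unfold Spec_check
  rw [Bool.eq_iff_iff, check_iff, ← check_alt_iff]
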